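-- pv_equiv track=rewrite | github.com/daniel-reich/ubiquitous-fiesta | ET2voBkuSPLb3mFSD_7.py | sum_every_nth
-- ===== SOURCE A (Python) =====
-- def sum_every_nth(numbers, n):
--   i = 1;
--   sum = 0;
--   for x in numbers:
--     if i == n:
--       sum = sum + x
--       i = 0
--     i = i + 1
--   return sum
-- ===== SOURCE B (Python) =====
-- def sum_every_nth(numbers, n):
--     # Stride by chunks: take the last element of each full chunk of n.
--     if n <= 0:
--         return 0
--     total = 0
--     rest = numbers
--     while len(rest) >= n:
--         total += rest[n - 1]
--         rest = rest[n:]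
--     return total
-- ===== Notes on version B (the rewrite author's own statement) =====
-- stated objective: alternative
-- what changed: B strides over the list in chunks of n (adding the last element of each full chunk and slicing the rest away), instead of scanning every element while maintaining a reset counter; n <= 0 falls out as the natural empty stride.
import Mathlib
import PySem

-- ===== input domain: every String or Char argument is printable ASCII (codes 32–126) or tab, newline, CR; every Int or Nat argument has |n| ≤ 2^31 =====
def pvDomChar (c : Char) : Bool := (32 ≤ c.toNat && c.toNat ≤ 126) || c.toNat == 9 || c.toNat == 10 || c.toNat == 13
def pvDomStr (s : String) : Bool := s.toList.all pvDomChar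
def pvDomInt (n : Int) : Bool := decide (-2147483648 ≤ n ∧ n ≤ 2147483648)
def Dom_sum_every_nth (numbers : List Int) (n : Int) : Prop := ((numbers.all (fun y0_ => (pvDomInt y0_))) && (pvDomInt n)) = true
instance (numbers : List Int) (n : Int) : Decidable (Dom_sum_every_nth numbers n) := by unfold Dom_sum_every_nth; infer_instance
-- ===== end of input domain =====

-- B strides over the list in chunks of n (adding the last element of each full chunk and
-- slicing the rest away) instead of A's per-element scan with a reset counter; same cost.

-- ===== PORT A =====
-- the body of A's for-loop
def pvStepA (n : Int) (st : Int × Int) (x : Int) : Int × Int :=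
  let i := st.1
  let s := st.2
  let (s, i) := if i == n then (s + x, 0) else (s, i)
  (i + 1, s)

def sum_every_nth (numbers : List Int) (n : Int) : Int :=
  (numbers.foldl (pvStepA n) (1, 0)).2

-- ===== PORT B =====
-- the while loop of Source B; the '0 < m' guard only makes the recursion total (Source B checks n > 0 before the loop)
def pvGo (m : Nat) (rest : List Int) (total : Int) : Int :=
  if h : 0 < m ∧ m ≤ rest.length then
    pvGo m (rest.drop m) (total + PySem.List.pyGetD rest ((m : Int) - 1) 0)
  else total
termination_by rest.length
decreasing_by simp; omega

def sum_every_nth_alt (numbers : List Int) (n : Int) : Int :=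
  if n ≤ 0 then 0 else pvGo n.toNat numbers 0

-- ===== PRECONDITION & SPEC =====
def Spec_sum_every_nth (numbers : List Int) (n : Int) (out : Int) : Prop := out = sum_every_nth_alt numbers n
instance (numbers : List Int) (n : Int) (out : Int) : Decidable (Spec_sum_every_nth numbers n out) := by unfold Spec_sum_every_nth; infer_instance

-- ===== CLAIM (what is proved, stated in full; the proofs are below) =====
def Claim_equal_sum_every_nth : Prop := ∀ (numbers : List Int) (n : Int), Dom_sum_every_nth numbers n → Spec_sum_every_nth numbers n (sum_every_nth numbers n)

-- ===== LEMMAS AND PROOFS =====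

-- the common value: sum of the elements at positions j, j+m, j+2m, …
def pvPick (m : Nat) : Nat → List Int → Int
  | _, [] => 0
  | 0, x :: L => x + pvPick m (m - 1) L
  | j + 1, _ :: L => pvPick m j L

lemma pvPick_skip (m : Nat) (L : List Int) : ∀ j : Nat,
    pvPick m j L = if h : j < L.length then L[j] + pvPick m (m - 1) (L.drop (j + 1)) else 0 := by
  induction L with
  | nil => intro j; simp [pvPick]
  | cons x L ih =>
    intro j
    cases j with
    | zero => simp [pvPick]
    | succ j => simpa [pvPick, Nat.succ_lt_succ_iff] using ih j

lemma pvGo_eq (m : Nat) (L : List Int) (t : Int) (hm : 0 < m) :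
    pvGo m L t = t + pvPick m (m - 1) L := by
  fun_induction pvGo m L t with
  | case1 rest total h ih =>
    rw [pvPick_skip]
    have hlt : m - 1 < rest.length := by omega
    rw [dif_pos hlt]
    have hc : ((m : Int) - 1) = ((m - 1 : Nat) : Int) := by omega
    have : PySem.List.pyGetD rest ((m : Int) - 1) 0 = rest[m - 1] := by
      rw [hc, PySem.List.pyGetD_natCast]
      simp [List.getD, hlt]
    have hdrop : m - 1 + 1 = m := by omega
    rw [hdrop] at *
    rw [ih, this]
    ring
  | case2 rest total h =>
    rw [pvPick_skip]
    have : ¬ (m - 1 < rest.length) := by omega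
    rw [dif_neg this]
    ring

lemma foldA_pos (n : Int) (hn : 1 ≤ n) : ∀ (L : List Int) (i s : Int), 1 ≤ i → i ≤ n →
    (L.foldl (pvStepA n) (i, s)).2 = s + pvPick n.toNat (n - i).toNat L := by
  intro L
  induction L with
  | nil => intro i s _ _; simp [pvPick]
  | cons x L ih =>
    intro i s h1 h2
    rw [List.foldl_cons]
    by_cases hin : i = n
    · have h0 : (n - i).toNat = 0 := by omega
      have hstep : pvStepA n (i, s) x = (1, s + x) := by simp [pvStepA, hin]
      rw [hstep, ih 1 (s + x) (by omega) hn, h0]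
      have hmm : (n - 1).toNat = n.toNat - 1 := by omega
      simp [pvPick, hmm]
      ring
    · have hj : (n - i).toNat = (n - (i + 1)).toNat + 1 := by omega
      have hstep : pvStepA n (i, s) x = (i + 1, s) := by simp [pvStepA, hin]
      rw [hstep, ih (i + 1) s (by omega) (by omega), hj]
      simp [pvPick]

lemma foldA_nonpos (n : Int) (hn : n ≤ 0) : ∀ (L : List Int) (i s : Int), 1 ≤ i →
    (L.foldl (pvStepA n) (i, s)).2 = s := by
  intro L
  induction L with
  | nil => intro i s _; simp
  | cons x L ih =>
    intro i s h1
    have hne : i ≠ n := by omega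
    have hstep : pvStepA n (i, s) x = (i + 1, s) := by simp [pvStepA, hne]
    rw [List.foldl_cons, hstep]
    exact ih (i + 1) s (by omega)

-- ===== VERDICT (by name: the statement is the Claim_ definition above) =====
theorem sum_every_nth_spec : Claim_equal_sum_every_nth := by
  intro numbers n _
  unfold Spec_sum_every_nth sum_every_nth sum_every_nth_alt
  by_cases hn : n ≤ 0
  · rw [if_pos hn]
    exact foldA_nonpos n hn numbers 1 0 (by omega : (1:Int) ≤ 1)
  · rw [if_neg hn]
    have h1 : (1 : Int) ≤ n := by omega
    rw [foldA_pos n h1 numbers 1 0 (by omega : (1:Int) ≤ 1) h1,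
        pvGo_eq n.toNat numbers 0 (by omega)]
    have : (n - 1).toNat = n.toNat - 1 := by omega
    rw [this]
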